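-- pv_equiv track=rewrite | github.com/silly0302/BaekJoon | 프로그래머스/0/181837. 커피 심부름/커피 심부름.py | solution
-- ===== SOURCE A (Python) =====
-- def solution(order):
--     answer = 0
--     for i in range(len(order)):
--         if order[i] in ["iceamericano", "americanoice", "hotamericano", "americanohot", "americano", "anything"]:
--             answer += 4500
--         elif order[i] in ["icecafelatte", "cafelatteice", "hotcafelatte", "cafelattehot", "cafelatte"]:
--             answer += 5000
--     return answer
-- ===== SOURCE B (Python) =====
-- AMERICANOS = ["iceamericano", "americanoice", "hotamericano", "americanohot", "americano", "anything"]
-- CAFELATTES = ["icecafelatte", "cafelatteice", "hotcafelatte", "cafelattehot", "cafelatte"]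
--
-- def solution(order):
--     # pass 1: frequency table of the order
--     counts = {}
--     for item in order:
--         counts[item] = counts.get(item, 0) + 1
--     # pass 2: iterate over the MENU, not the order
--     return 4500 * sum(counts.get(m, 0) for m in AMERICANOS) \
--          + 5000 * sum(counts.get(m, 0) for m in CAFELATTES)
-- ===== Notes on version B (the rewrite author's own statement) =====
-- stated objective: alternative
-- what changed: Inverts the traversal: instead of classifying each order item through an if/elif membership cascade, B first builds a frequency table of the order and then loops over the eleven menu names, returning 4500*sum(americano counts) + 5000*sum(cafelatte counts); correctness follows from exchanging the order of summation (each item contributes its price exactly once, unknown items appear in neither menu list).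
import Mathlib
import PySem

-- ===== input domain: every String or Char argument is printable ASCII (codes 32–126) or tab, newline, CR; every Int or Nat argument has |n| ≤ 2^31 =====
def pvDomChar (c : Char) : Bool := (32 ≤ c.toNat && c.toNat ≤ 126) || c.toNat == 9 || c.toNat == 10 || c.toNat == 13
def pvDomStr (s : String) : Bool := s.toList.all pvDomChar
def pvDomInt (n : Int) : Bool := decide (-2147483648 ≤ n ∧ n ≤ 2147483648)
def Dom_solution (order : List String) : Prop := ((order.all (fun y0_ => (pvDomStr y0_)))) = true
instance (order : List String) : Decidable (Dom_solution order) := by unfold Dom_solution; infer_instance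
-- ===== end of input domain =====

-- B inverts the traversal: a frequency table of the order, then a loop over the eleven menu
-- names (4500 * sum of americano counts + 5000 * sum of cafelatte counts); alternative, not faster.

-- ===== PORT A =====
-- for i in range(len(order)): if order[i] in [...]: answer += 4500 elif ...: answer += 5000
def solution (order : List String) : Int :=
  (PySem.List.pyRange 0 order.length 1).foldl
    (fun answer i =>
      if PySem.List.pyGetD order i "" ∈ ["iceamericano", "americanoice", "hotamericano", "americanohot", "americano", "anything"] then
        answer + 4500
      else if PySem.List.pyGetD order i "" ∈ ["icecafelatte", "cafelatteice", "hotcafelatte", "cafelattehot", "cafelatte"] then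
        answer + 5000
      else answer) 0

-- ===== PORT B =====
def AMERICANOS : List String :=
  ["iceamericano", "americanoice", "hotamericano", "americanohot", "americano", "anything"]
def CAFELATTES : List String :=
  ["icecafelatte", "cafelatteice", "hotcafelatte", "cafelattehot", "cafelatte"]

-- counts = {}; for item in order: counts[item] = counts.get(item, 0) + 1
-- return 4500 * sum(counts.get(m, 0) for m in AMERICANOS) + 5000 * sum(... CAFELATTES)
def solution_alt (order : List String) : Int :=
  let counts : PySem.Dict String Int :=
    order.foldl (fun d item => d.insert item (d.getD item 0 + 1)) PySem.Dict.empty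
  4500 * (AMERICANOS.map (fun m => counts.getD m 0)).sum
    + 5000 * (CAFELATTES.map (fun m => counts.getD m 0)).sum

-- ===== PRECONDITION & SPEC =====
def Spec_solution (order : List String) (out : Int) : Prop := out = solution_alt order
instance (order : List String) (out : Int) : Decidable (Spec_solution order out) := by unfold Spec_solution; infer_instance

-- ===== CLAIM =====
def Claim_equal_solution : Prop := ∀ (order : List String), Dom_solution order → Spec_solution order (solution order)

-- ===== LEMMAS AND PROOFS =====

-- A's loop over the order, with the accumulator generalized, equals the menu-side sum of counts.
theorem solutionA_foldl_eq (xs : List String) : ∀ (a : Int),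
    xs.foldl
      (fun answer s =>
        if s ∈ ["iceamericano", "americanoice", "hotamericano", "americanohot", "americano", "anything"] then
          answer + 4500
        else if s ∈ ["icecafelatte", "cafelatteice", "hotcafelatte", "cafelattehot", "cafelatte"] then
          answer + 5000
        else answer) a
    = a + 4500 * ((xs.count "iceamericano" : Int) + xs.count "americanoice" + xs.count "hotamericano"
                  + xs.count "americanohot" + xs.count "americano" + xs.count "anything")
        + 5000 * ((xs.count "icecafelatte" : Int) + xs.count "cafelatteice" + xs.count "hotcafelatte"
                  + xs.count "cafelattehot" + xs.count "cafelatte") := by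
  induction xs with
  | nil => intro a; simp
  | cons x xs ih =>
    intro a
    rw [List.foldl_cons, ih]
    by_cases hA : x ∈ (["iceamericano", "americanoice", "hotamericano", "americanohot", "americano", "anything"] : List String)
    · rw [if_pos hA]
      fin_cases hA <;> simp <;> ring
    · rw [if_neg hA]
      by_cases hC : x ∈ (["icecafelatte", "cafelatteice", "hotcafelatte", "cafelattehot", "cafelatte"] : List String)
      · rw [if_pos hC]
        fin_cases hC <;> simp <;> ring
      · rw [if_neg hC]
        simp only [List.mem_cons, List.not_mem_nil, or_false, not_or] at hA hC
        obtain ⟨n1, n2, n3, n4, n5, n6⟩ := hA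
        obtain ⟨m1, m2, m3, m4, m5⟩ := hC
        simp [n1, n2, n3, n4, n5, n6, m1, m2, m3, m4, m5]

theorem solution_spec : Claim_equal_solution := by
  intro order _
  unfold Spec_solution solution solution_alt
  rw [PySem.List.foldl_pyRange_zero_pyGetD' order "" (fun answer s =>
      if s ∈ ["iceamericano", "americanoice", "hotamericano", "americanohot", "americano", "anything"] then
        answer + 4500
      else if s ∈ ["icecafelatte", "cafelatteice", "hotcafelatte", "cafelattehot", "cafelatte"] then
        answer + 5000
      else answer) 0]
  rw [solutionA_foldl_eq order 0]
  simp only [PySem.Dict.foldl_insert_getD_add_one_eq_counter, AMERICANOS, CAFELATTES,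
    List.map_cons, List.map_nil, List.sum_cons, List.sum_nil, PySem.Dict.getD_counter]
  ring
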